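-- pv_equiv track=rewrite | github.com/dleiferives/audio_code | parser.py | parse
-- ===== SOURCE A (Python) =====
-- def parse(code: str):
--     lines = code.splitlines()
--     cells = []
--     # Stack holds tuples: (indentation level, header line content)
--     stack = []
--
--     for line in lines:
--         if not line.strip():
--             continue  # Skip blank lines
--
--         # Determine the current indentation level.
--         indent = len(line) - len(line.lstrip())
--         content = line.lstrip()  # Preserve the original line content
--
--         # Check if this is a header line (ends with ":")
--         is_header = content.endswith(":")
--
--         # Pop headers from the stack if their indent is greater than or equal
--         # to the current line. This determines the current nesting structure.
--         while stack and stack[-1][0] >= indent: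
--             stack.pop()
--
--         if is_header:
--             # Format the cell for a header.
--             if not stack:
--                 cell = f"[{content}]"
--             else:
--                 parent_chain = ", ".join(item[1] for item in stack)
--                 cell = f"in {parent_chain}, {content}"
--             # Push this header into the stack.
--             stack.append((indent, content))
--             cells.append(cell)
--         else:
--             # Format a non-header cell.
--             if stack:
--                 chain = ", ".join("in " + item[1] for item in stack)
--                 cell = f"{chain}, {content}"
--             else:
--                 cell = content
--             cells.append(cell)
--
--     return cells
-- ===== SOURCE B (Python) =====
-- def parse(code: str):
--     # Pass 1: tabulate the non-blank lines as (indent, content, is_header) rows.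
--     rows = []
--     for line in code.splitlines():
--         if line.strip():
--             content = line.lstrip()
--             rows.append((len(line) - len(content), content, content.endswith(":")))
--
--     # Pass 2: for each row, recover its header ancestry by a backward
--     # nearest-smaller-indent walk over the earlier rows (no running stack).
--     cells = []
--     for i, (indent, content, is_header) in enumerate(rows):
--         anc = []
--         t = indent
--         for j in range(i - 1, -1, -1):
--             pind, pcontent, phdr = rows[j]
--             if pind < t:
--                 if phdr:
--                     anc.append(pcontent)
--                 t = pind
--         anc.reverse()
--         if is_header:
--             cells.append(f"[{content}]" if not anc
--                          else "in " + ", ".join(anc) + ", " + content)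
--         else:
--             cells.append(content if not anc
--                          else ", ".join("in " + a for a in anc) + ", " + content)
--     return cells
-- ===== Notes on version B (the rewrite author's own statement) =====
-- stated objective: alternative
-- what changed: Replaces A's single pass with a mutating header stack by two passes: tabulate the non-blank lines, then recompute each line's header ancestry independently with a backward nearest-smaller-indent walk over the earlier rows.
import Mathlib
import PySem

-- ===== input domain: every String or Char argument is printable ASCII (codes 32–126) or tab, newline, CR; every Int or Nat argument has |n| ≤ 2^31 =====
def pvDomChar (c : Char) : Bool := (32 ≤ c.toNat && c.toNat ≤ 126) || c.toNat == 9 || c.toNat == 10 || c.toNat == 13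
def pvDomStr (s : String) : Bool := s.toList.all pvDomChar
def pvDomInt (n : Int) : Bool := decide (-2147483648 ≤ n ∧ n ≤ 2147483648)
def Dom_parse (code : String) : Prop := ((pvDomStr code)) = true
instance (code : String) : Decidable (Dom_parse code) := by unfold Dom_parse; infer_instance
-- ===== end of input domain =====

-- B replaces A's single pass with a mutating header stack by two passes: tabulate the
-- non-blank rows, then recompute each row's header ancestry independently with a backward
-- nearest-smaller-indent walk (alternative decomposition, not claimed faster).

-- ===== PORT A =====

-- the `while stack and stack[-1][0] >= indent: stack.pop()` loop (pops from the END)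
def popGE (stack : List (Int × String)) (indent : Int) : List (Int × String) :=
  match h : stack.getLast? with
  | none => stack
  | some p =>
      if indent ≤ p.1 then popGE stack.dropLast indent else stack
  termination_by stack.length
  decreasing_by
    cases stack with
    | nil => simp at h
    | cons a l => simp [List.length_dropLast]

-- the body of A's `for line in lines` loop; state = (cells, stack)
def stepA (st : List String × List (Int × String)) (line : String) :
    List String × List (Int × String) :=
  if PySem.Str.strip line = "" then st
  else
    let content := PySem.Str.lstrip line
    let indent : Int := PySem.Str.len line - PySem.Str.len content
    let isHeader := PySem.Str.endswith content ":"
    let stack' := popGE st.2 indent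
    if isHeader then
      let cell :=
        if stack' = [] then "[" ++ content ++ "]"
        else "in " ++ PySem.Str.join ", " (stack'.map (·.2)) ++ ", " ++ content
      (st.1 ++ [cell], stack' ++ [(indent, content)])
    else
      let cell :=
        if stack' ≠ [] then
          PySem.Str.join ", " (stack'.map (fun p => "in " ++ p.2)) ++ ", " ++ content
        else content
      (st.1 ++ [cell], stack')

def parse (code : String) : List String :=
  ((PySem.Str.splitlines code).foldl stepA ([], [])).1

-- ===== PORT B =====

-- pass 1 loop body: collect (indent, content, is_header) of non-blank lines
def rowsStepB (acc : List (Int × String × Bool)) (line : String) :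
    List (Int × String × Bool) :=
  if PySem.Str.strip line ≠ "" then
    let content := PySem.Str.lstrip line
    acc ++ [(PySem.Str.len line - PySem.Str.len content, content,
             PySem.Str.endswith content ":")]
  else acc

-- the backward `for j in range(i-1,-1,-1)` walk: earlier rows given innermost-first
def walkB : List (Int × String × Bool) → Int → List String
  | [], _ => []
  | (pind, pc, ph) :: rest, t =>
      if pind < t then (if ph then pc :: walkB rest pind else walkB rest pind)
      else walkB rest t

-- pass 2: one cell per row; prevRev = rows already handled, innermost first
def goB : List (Int × String × Bool) → List (Int × String × Bool) → List String
  | _, [] => []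
  | prevRev, (indent, content, isHeader) :: rest =>
      let anc := (walkB prevRev indent).reverse
      let cell :=
        if isHeader then
          if anc = [] then "[" ++ content ++ "]"
          else "in " ++ PySem.Str.join ", " anc ++ ", " ++ content
        else
          if anc = [] then content
          else PySem.Str.join ", " (anc.map (fun a => "in " ++ a)) ++ ", " ++ content
      cell :: goB ((indent, content, isHeader) :: prevRev) rest

def parse_alt (code : String) : List String :=
  goB [] ((PySem.Str.splitlines code).foldl rowsStepB [])

-- ===== PRECONDITION & SPEC =====
def Spec_parse (code : String) (out : List String) : Prop := out = parse_alt code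
instance (code : String) (out : List String) : Decidable (Spec_parse code out) := by unfold Spec_parse; infer_instance

-- ===== CLAIM (what is proved, stated in full; the proofs are below) =====
def Claim_equal_parse : Prop := ∀ (code : String), Dom_parse code → Spec_parse code (parse code)

-- ===== LEMMAS AND PROOFS =====

def rowOf (line : String) : Int × String × Bool :=
  let content := PySem.Str.lstrip line
  (PySem.Str.len line - PySem.Str.len content, content, PySem.Str.endswith content ":")

def rowOpt (line : String) : Option (Int × String × Bool) :=
  if PySem.Str.strip line = "" then none else some (rowOf line)

-- A's per-row step
def stepR (st : List String × List (Int × String)) (r : Int × String × Bool) :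
    List String × List (Int × String) :=
  let stack' := popGE st.2 r.1
  if r.2.2 then
    let cell :=
      if stack' = [] then "[" ++ r.2.1 ++ "]"
      else "in " ++ PySem.Str.join ", " (stack'.map (·.2)) ++ ", " ++ r.2.1
    (st.1 ++ [cell], stack' ++ [(r.1, r.2.1)])
  else
    let cell :=
      if stack' ≠ [] then
        PySem.Str.join ", " (stack'.map (fun p => "in " ++ p.2)) ++ ", " ++ r.2.1
      else r.2.1
    (st.1 ++ [cell], stack')

-- the walk, keeping indents; threshold none = no bound yet
def walkS : List (Int × String × Bool) → Option Int → List (Int × String)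
  | [], _ => []
  | (pind, pc, ph) :: rest, t =>
      if (match t with | none => true | some x => pind < x) then
        (if ph then (pind, pc) :: walkS rest (some pind) else walkS rest (some pind))
      else walkS rest t

theorem stepA_eq (st : List String × List (Int × String)) (line : String) :
    stepA st line = (match rowOpt line with
      | none => st
      | some r => stepR st r) := by
  by_cases h : PySem.Str.strip line = "" <;>
    simp [stepA, rowOpt, rowOf, stepR, h]

theorem foldA_rows (lines : List String) :
    ∀ st, lines.foldl stepA st = (lines.filterMap rowOpt).foldl stepR st := by
  induction lines with
  | nil => intro st; rfl
  | cons line rest ih =>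
      intro st
      rw [List.foldl_cons, stepA_eq, List.filterMap_cons]
      cases h : rowOpt line <;> simp [ih]

theorem rowsB_eq (lines : List String) :
    ∀ acc, lines.foldl rowsStepB acc = acc ++ lines.filterMap rowOpt := by
  induction lines with
  | nil => intro acc; simp
  | cons line rest ih =>
      intro acc
      by_cases h : PySem.Str.strip line = "" <;>
        simp [rowsStepB, rowOpt, rowOf, h, ih, List.append_assoc]

theorem walkS_map_snd (L : List (Int × String × Bool)) :
    ∀ i, (walkS L (some i)).map (·.2) = walkB L i := by
  induction L with
  | nil => intro i; rfl
  | cons r rest ih =>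
      intro i
      obtain ⟨pind, pc, ph⟩ := r
      by_cases h : pind < i <;> by_cases hh : ph <;>
        simp [walkS, walkB, h, hh, ih]

theorem walkS_lt (L : List (Int × String × Bool)) :
    ∀ i p, p ∈ walkS L (some i) → p.1 < i := by
  induction L with
  | nil => intro i p hp; simp [walkS] at hp
  | cons r rest ih =>
      intro i p hp
      obtain ⟨pind, pc, ph⟩ := r
      by_cases h : pind < i
      · by_cases hh : ph
        · simp [walkS, h, hh] at hp
          rcases hp with hp | hp
          · subst hp; simpa using h
          · exact lt_trans (ih pind p hp) h
        · simp [walkS, h, hh] at hp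
          exact lt_trans (ih pind p hp) h
      · simp [walkS, h] at hp
        exact ih i p hp

theorem walkS_dropWhile (L : List (Int × String × Bool)) :
    ∀ (i : Int) (t : Option Int), (∀ x, t = some x → i ≤ x) →
      walkS L (some i) = (walkS L t).dropWhile (fun p => decide (i ≤ p.1)) := by
  induction L with
  | nil => intro i t _; rfl
  | cons r rest ih =>
      intro i t ht
      obtain ⟨pind, pc, ph⟩ := r
      have hstep : ∀ (s : Option Int),
          (match s with | none => true | some x => decide (pind < x)) = true →
          walkS ((pind, pc, ph) :: rest) s
            = if ph then (pind, pc) :: walkS rest (some pind)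
              else walkS rest (some pind) := by
        intro s hs
        cases s <;> simp_all [walkS]
      have hskip : ∀ (x : Int), ¬ pind < x →
          walkS ((pind, pc, ph) :: rest) (some x) = walkS rest (some x) := by
        intro x hx
        simp [walkS, hx]
      have accepted : ∀ (s : Option Int),
          (match s with | none => true | some x => decide (pind < x)) = true →
          walkS ((pind, pc, ph) :: rest) (some i)
            = (walkS ((pind, pc, ph) :: rest) s).dropWhile (fun p => decide (i ≤ p.1)) := by
        intro s hs
        rw [hstep s hs]
        by_cases h : pind < i
        · rw [hstep (some i) (by simpa using h)]
          cases ph with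
          | true => simp [not_le.mpr h]
          | false =>
              simp only [Bool.false_eq_true, if_false]
              cases hW : walkS rest (some pind) with
              | nil => simp
              | cons q qs =>
                  have hq : q.1 < pind := walkS_lt rest pind q (hW ▸ List.mem_cons_self)
                  rw [List.dropWhile_cons]
                  simp [not_le.mpr (lt_trans hq h)]
        · rw [hskip i h]
          have ihp := ih i (some pind) (fun y hy => by cases hy; exact not_lt.mp h)
          cases ph with
          | true => simpa [List.dropWhile_cons, not_lt.mp h] using ihp
          | false => simpa using ihp
      cases t with
      | none => exact accepted none rfl
      | some x =>
          have hix : i ≤ x := ht x rfl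
          by_cases hpx : pind < x
          · exact accepted (some x) (by simpa using hpx)
          · have hpi : ¬ pind < i := fun hc => hpx (lt_of_lt_of_le hc hix)
            rw [hskip i hpi, hskip x hpx]
            exact ih i (some x) (fun y hy => by cases hy; exact hix)

theorem popGE_reverse (M : List (Int × String)) (i : Int) :
    popGE M.reverse i = (M.dropWhile (fun p => decide (i ≤ p.1))).reverse := by
  induction M with
  | nil => simp [popGE]
  | cons p M' ih =>
      rw [popGE]
      have hrev : (p :: M').reverse = M'.reverse ++ [p] := by simp
      rw [hrev, List.getLast?_concat]
      by_cases h : i ≤ p.1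
      · simp only [h, if_true, List.dropLast_concat]
        rw [ih, List.dropWhile_cons]
        simp [h]
      · rw [List.dropWhile_cons]
        simp [h]

theorem stack_pop_eq (prevRev : List (Int × String × Bool)) (i : Int) :
    popGE ((walkS prevRev none).reverse) i = (walkS prevRev (some i)).reverse := by
  rw [popGE_reverse, ← walkS_dropWhile prevRev i none (by intro x hx; cases hx)]

theorem goB_spec (rows : List (Int × String × Bool)) :
    ∀ (cells : List String) (prevRev : List (Int × String × Bool)),
      (rows.foldl stepR (cells, (walkS prevRev none).reverse)).1 =
        cells ++ goB prevRev rows := by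
  induction rows with
  | nil => intro cells prevRev; simp [goB]
  | cons r rest ih =>
      intro cells prevRev
      obtain ⟨ind, c, h⟩ := r
      rw [List.foldl_cons]
      have hpop : popGE ((walkS prevRev none).reverse) ind
          = (walkS prevRev (some ind)).reverse := stack_pop_eq prevRev ind
      have hmap : ((walkS prevRev (some ind)).reverse).map (·.2)
          = (walkB prevRev ind).reverse := by
        rw [← walkS_map_snd, List.map_reverse]
      have hnil : ((walkS prevRev (some ind)).reverse = []) ↔
          ((walkB prevRev ind).reverse = []) := by
        rw [← hmap]; simp
      by_cases hh : h
      · have hstep : stepR (cells, (walkS prevRev none).reverse) (ind, c, h)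
            = (cells ++ [if (walkB prevRev ind).reverse = [] then "[" ++ c ++ "]"
                else "in " ++ PySem.Str.join ", " ((walkB prevRev ind).reverse) ++ ", " ++ c],
               (walkS prevRev (some ind)).reverse ++ [(ind, c)]) := by
          simp only [stepR, hpop, hh, if_true, hmap, hnil]
        rw [hstep]
        have hstack : (walkS prevRev (some ind)).reverse ++ [(ind, c)]
            = (walkS ((ind, c, h) :: prevRev) none).reverse := by
          simp [walkS, hh]
        rw [hstack, ih]
        simp [goB, hh, List.append_assoc]
      · have hmap2 : ((walkS prevRev (some ind)).reverse).map (fun p => "in " ++ p.2)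
            = ((walkB prevRev ind).reverse).map (fun a => "in " ++ a) := by
          rw [← hmap, List.map_map]; rfl
        have hstep : stepR (cells, (walkS prevRev none).reverse) (ind, c, h)
            = (cells ++ [if (walkB prevRev ind).reverse = [] then c
                else PySem.Str.join ", "
                    (((walkB prevRev ind).reverse).map (fun a => "in " ++ a)) ++ ", " ++ c],
               (walkS prevRev (some ind)).reverse) := by
          by_cases hn : (walkS prevRev (some ind)).reverse = []
          · simp only [stepR, hpop, hh, hnil.mp hn]
            simp [List.reverse_eq_nil_iff.mp hn]
          · simp only [stepR, hpop, hh, hmap2]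
            simp [hn, (not_iff_not.mpr hnil).mp hn]
        rw [hstep]
        have hstack : (walkS prevRev (some ind)).reverse
            = (walkS ((ind, c, h) :: prevRev) none).reverse := by
          simp [walkS, hh]
        rw [hstack, ih]
        simp [goB, hh, List.append_assoc]

-- ===== VERDICT (by name: the statement is the Claim_ definition above) =====
theorem parse_spec : Claim_equal_parse := by
  intro code _
  unfold Spec_parse parse parse_alt
  rw [foldA_rows, rowsB_eq]
  have h0 : ([] : List (Int × String)) = (walkS [] none).reverse := rfl
  rw [List.nil_append, show (([] : List String), ([] : List (Int × String)))
      = (([] : List String), (walkS [] none).reverse) from rfl, goB_spec]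
  simp
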